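-- pv_equiv track=rewrite | github.com/Ratnakara-Sarma/pii_parallel_runner | pii_get_local.py | entity_counter
-- ===== SOURCE A (Python) =====
-- def entity_counter(entity_list):
--     freq = {}
--     entity_list = sorted(entity_list)
--     for items in entity_list:
--         freq[items] = entity_list.count(items)
--
--     counter = ""
--     for key, value in freq.items():
--         if key == entity_list[-1]:
--             counter += f"{key}:{value}"
--         else:
--             counter += f"{key}:{value}"+", "
--     return counter
-- ===== SOURCE B (Python) =====
-- from itertools import groupby
--
-- def entity_counter(entity_list):
--     return ", ".join(
--         f"{key}:{len(list(group))}"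
--         for key, group in groupby(sorted(entity_list))
--     )
-- ===== Notes on version B (the rewrite author's own statement) =====
-- stated objective: faster
-- what changed: Replaces the dict built by repeated entity_list.count scans (quadratic) and the conditional-trailing-comma accumulation with a single groupby pass over the sorted list joined by ', '.
import Mathlib
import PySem

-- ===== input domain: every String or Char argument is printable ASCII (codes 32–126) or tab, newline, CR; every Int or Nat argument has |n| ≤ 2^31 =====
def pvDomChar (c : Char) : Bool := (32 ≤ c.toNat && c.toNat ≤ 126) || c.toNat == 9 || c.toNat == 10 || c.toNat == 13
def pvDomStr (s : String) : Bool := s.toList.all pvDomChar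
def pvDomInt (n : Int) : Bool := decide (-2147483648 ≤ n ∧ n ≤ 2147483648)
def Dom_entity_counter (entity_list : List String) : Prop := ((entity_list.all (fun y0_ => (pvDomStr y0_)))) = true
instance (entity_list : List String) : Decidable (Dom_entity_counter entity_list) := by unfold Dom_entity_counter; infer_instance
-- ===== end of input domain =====

-- B replaces A's quadratic dict-of-repeated-.count build and conditional-trailing-comma
-- accumulation by one groupby (run-length) pass over the sorted list joined with ", ".

-- ===== PORT A =====
-- entity_list[-1] inside the loop: the loop body only runs when freq (hence the sorted
-- list) is nonempty, so the pyGetD default "" is never the value compared.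
def entity_counter (entity_list : List String) : String :=
  let s := PySem.List.sorted entity_list (fun x => x) false
  let freq := s.foldl (fun d x => d.insert x ((PySem.List.count s x : Int))) PySem.Dict.empty
  freq.items.foldl
    (fun counter kv =>
      if kv.1 == PySem.List.pyGetD s (-1) "" then
        counter ++ (kv.1 ++ ":" ++ PySem.Int.toStr kv.2)
      else
        counter ++ (kv.1 ++ ":" ++ PySem.Int.toStr kv.2) ++ ", ")
    ""

-- ===== PORT B =====
-- itertools.groupby over a list: successive runs of equal elements with their lengths.
def ecGroupRuns : List String → List (String × Int)
  | [] => []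
  | x :: xs =>
      (x, ((xs.takeWhile (fun y => y == x)).length + 1 : Int)) ::
        ecGroupRuns (xs.dropWhile (fun y => y == x))
  termination_by l => l.length
  decreasing_by
    simpa using Nat.lt_succ_of_le (List.length_dropWhile_le (fun y => y == x) xs)

def entity_counter_alt (entity_list : List String) : String :=
  PySem.Str.join ", "
    ((ecGroupRuns (PySem.List.sorted entity_list (fun x => x) false)).map
      (fun kc => kc.1 ++ ":" ++ PySem.Int.toStr kc.2))

-- ===== PRECONDITION & SPEC =====
def Spec_entity_counter (entity_list : List String) (out : String) : Prop := out = entity_counter_alt entity_list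
instance (entity_list : List String) (out : String) : Decidable (Spec_entity_counter entity_list out) := by unfold Spec_entity_counter; infer_instance

-- ===== CLAIM (what is proved, stated in full; the proofs are below) =====
def Claim_equal_entity_counter : Prop := ∀ (entity_list : List String), Dom_entity_counter entity_list → Spec_entity_counter entity_list (entity_counter entity_list)

-- ===== LEMMAS AND PROOFS =====

-- every element dropped past a run of x in a (≤)-sorted x-headed list is > x
lemma ec_run_gt (x : String) (xs : List String) (h : (x :: xs).Pairwise (· ≤ ·)) :
    ∀ y ∈ xs.dropWhile (fun y => y == x), x < y := by
  induction xs with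
  | nil => intro y hy; simp [List.dropWhile] at hy
  | cons z zs ih =>
    rw [List.pairwise_cons] at h
    obtain ⟨hx, hzzs⟩ := h
    by_cases hz : z = x
    · subst hz
      rw [show (z :: zs).dropWhile (fun y => y == z) = zs.dropWhile (fun y => y == z) by
        simp [List.dropWhile]]
      exact ih (List.pairwise_cons.mpr
        ⟨fun y hy => hx y (List.mem_cons_of_mem _ hy), (List.pairwise_cons.mp hzzs).2⟩)
    · have hzx : (z == x) = false := beq_eq_false_iff_ne.mpr hz
      rw [show (z :: zs).dropWhile (fun y => y == x) = z :: zs by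
        simp [List.dropWhile, hzx]]
      intro y hy
      have hxz : x < z := lt_of_le_of_ne (hx z (by simp)) (Ne.symm hz)
      rcases List.mem_cons.mp hy with rfl | hy
      · exact hxz
      · exact lt_of_lt_of_le hxz ((List.pairwise_cons.mp hzzs).1 y hy)

-- run keys are members
lemma ec_runs_key_mem (s : List String) : ∀ p ∈ ecGroupRuns s, p.1 ∈ s := by
  induction s using ecGroupRuns.induct with
  | case1 => simp [ecGroupRuns]
  | case2 x xs ih =>
    rw [ecGroupRuns]
    intro p hp
    rcases List.mem_cons.mp hp with rfl | hp
    · simp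
    · exact List.mem_cons_of_mem _
        ((List.dropWhile_sublist _).subset (ih p hp))

-- run lengths are counts
lemma ec_runs_count (s : List String) (h : s.Pairwise (· ≤ ·)) :
    ∀ p ∈ ecGroupRuns s, p.2 = (PySem.List.count s p.1 : Int) := by
  induction s using ecGroupRuns.induct with
  | case1 => simp [ecGroupRuns]
  | case2 x xs ih =>
    have hgt := ec_run_gt x xs h
    have hsplit : xs.takeWhile (fun y => y == x) ++ xs.dropWhile (fun y => y == x) = xs :=
      List.takeWhile_append_dropWhile
    have hr_pair : (xs.dropWhile (fun y => y == x)).Pairwise (· ≤ ·) :=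
      List.Pairwise.sublist ((List.dropWhile_sublist _).trans (List.sublist_cons_self _ _)) h
    have hcx : ∀ k : String, PySem.List.count (x :: xs) k
        = PySem.List.count (x :: (xs.takeWhile (fun y => y == x))) k
          + PySem.List.count (xs.dropWhile (fun y => y == x)) k := by
      intro k
      rw [PySem.List.count_eq, PySem.List.count_eq, PySem.List.count_eq,
        show x :: xs = (x :: xs.takeWhile (fun y => y == x)) ++ xs.dropWhile (fun y => y == x) by
          simp [hsplit], List.count_append]
    rw [ecGroupRuns]
    intro p hp
    rcases List.mem_cons.mp hp with rfl | hp
    · simp only [hcx x]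
      have h1 : PySem.List.count (xs.dropWhile (fun y => y == x)) x = 0 := by
        rw [PySem.List.count_eq, List.count_eq_zero]
        intro hmem
        exact absurd rfl (ne_of_gt (hgt x hmem))
      have h2 : PySem.List.count (x :: (xs.takeWhile (fun y => y == x))) x
          = (xs.takeWhile (fun y => y == x)).length + 1 := by
        rw [PySem.List.count_eq]
        have hall : ∀ b ∈ x :: xs.takeWhile (fun y => y == x), x = b := by
          intro b hb
          rcases List.mem_cons.mp hb with rfl | hb
          · rfl
          · have hb' := List.mem_takeWhile_imp hb
            exact (eq_of_beq hb').symm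
        rw [List.count_eq_length.mpr hall]
        simp
      rw [h1, h2]
      push_cast
      ring
    · have hk : p.1 ∈ xs.dropWhile (fun y => y == x) := ec_runs_key_mem _ p hp
      have hne : p.1 ≠ x := Ne.symm (ne_of_lt (hgt _ hk))
      have h0 : PySem.List.count (x :: (xs.takeWhile (fun y => y == x))) p.1 = 0 := by
        rw [PySem.List.count_eq, List.count_eq_zero]
        intro hmem
        rcases List.mem_cons.mp hmem with h' | h'
        · exact hne h'
        · have h'' := List.mem_takeWhile_imp h'
          exact hne (eq_of_beq h'')
      rw [hcx, h0]
      simpa using ih hr_pair p hp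

-- re-inserting a key with its stored value leaves the dict unchanged
lemma ec_insert_same (d : PySem.Dict String Int) (x : String) (v : Int)
    (hnd : d.keys.Nodup) (h : d.get? x = some v) : d.insert x v = d := by
  have hc : d.contains x = true := by
    rw [PySem.Dict.contains_eq_isSome_get?, h]; rfl
  apply PySem.Dict.ext
  rw [PySem.Dict.items_insert_of_contains d v hc]
  conv_rhs => rw [← List.map_id d.items]
  apply List.map_congr_left
  intro p hp
  by_cases hpx : (p.1 == x) = true
  · have hk : p.1 = x := eq_of_beq hpx
    have hgp : d.get? p.1 = some p.2 := PySem.Dict.get?_of_mem_items d hp hnd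
    rw [hk] at hgp
    rw [h] at hgp
    have hv : v = p.2 := Option.some.inj hgp
    simp only [hpx, if_pos, id_eq]
    rw [Prod.ext_iff]
    exact ⟨hk.symm, hv⟩
  · simp [hpx]

-- a run of re-insertions of x with the value it already stores is a no-op
lemma ec_fold_const (f : String → Int) (x : String) :
    ∀ (t : List String), (∀ y ∈ t, y = x) →
    ∀ e : PySem.Dict String Int, e.keys.Nodup → e.get? x = some (f x) →
    t.foldl (fun d x => d.insert x (f x)) e = e := by
  intro t
  induction t with
  | nil => intro _ e _ _; rfl
  | cons y t' ih =>
    intro hall e hnd hget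
    have hy : y = x := hall y List.mem_cons_self
    subst hy
    rw [List.foldl_cons, ec_insert_same e y (f y) hnd hget]
    exact ih (fun z hz => hall z (List.mem_cons_of_mem _ hz)) e hnd hget

-- A's dict-building loop over a sorted list appends exactly one item per run
lemma ec_foldA_items (f : String → Int) :
    ∀ n (s : List String), s.length ≤ n → s.Pairwise (· ≤ ·) →
    ∀ d : PySem.Dict String Int, d.keys.Nodup → (∀ y ∈ s, d.contains y = false) →
    (s.foldl (fun d x => d.insert x (f x)) d).items
      = d.items ++ (ecGroupRuns s).map (fun kc => (kc.1, f kc.1)) := by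
  intro n
  induction n with
  | zero =>
    intro s hlen _ d _ _
    rw [List.eq_nil_of_length_eq_zero (Nat.le_zero.mp hlen)]
    simp [ecGroupRuns]
  | succ n ih =>
    intro s hlen hp d hnd hfresh
    match s with
    | [] => simp [ecGroupRuns]
    | x :: xs =>
      have hgt := ec_run_gt x xs hp
      have hsplit : xs.takeWhile (fun y => y == x) ++ xs.dropWhile (fun y => y == x) = xs :=
        List.takeWhile_append_dropWhile
      have hnd1 : (d.insert x (f x)).keys.Nodup := PySem.Dict.nodup_keys_insert d x (f x) hnd
      have hfresh1 : ∀ y ∈ xs.dropWhile (fun y => y == x), (d.insert x (f x)).contains y = false := by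
        intro y hy
        rw [PySem.Dict.contains_insert]
        have h1 : (y == x) = false :=
          beq_eq_false_iff_ne.mpr (Ne.symm (ne_of_lt (hgt y hy)))
        have h2 : d.contains y = false :=
          hfresh y (List.mem_cons_of_mem _ ((List.dropWhile_sublist _).subset hy))
        rw [h1, h2]
        rfl
      rw [List.foldl_cons,
        show xs = xs.takeWhile (fun y => y == x) ++ xs.dropWhile (fun y => y == x) from hsplit.symm,
        List.foldl_append,
        ec_fold_const f x _ (fun y hy => eq_of_beq (List.mem_takeWhile_imp (p := fun y => y == x) hy)) _
          hnd1 (PySem.Dict.get?_insert_self d x (f x)),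
        ih _ (by
          have h1 := List.length_dropWhile_le (fun y => y == x) xs
          have h2 : xs.length ≤ n := by simpa using hlen
          omega)
          (List.Pairwise.sublist
            ((List.dropWhile_sublist _).trans (List.sublist_cons_self _ _)) hp)
          _ hnd1 hfresh1,
        PySem.Dict.items_insert_of_not_contains d (f x) (hfresh x List.mem_cons_self)]
      conv_rhs => rw [ecGroupRuns]
      simp [hsplit]

-- the last run's key is the last element; earlier run keys differ from it
lemma ec_runs_last :
    ∀ s : List String, s.Pairwise (· ≤ ·) → ∀ hne : s ≠ [],
    ∃ M q, ecGroupRuns s = M ++ [q] ∧ s.getLast hne = q.1 ∧ ∀ p ∈ M, p.1 ≠ q.1 := by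
  intro s
  induction s using ecGroupRuns.induct with
  | case1 => intro _ hne; exact absurd rfl hne
  | case2 x xs ih =>
    intro h hne
    have hgt := ec_run_gt x xs h
    have hsplit : xs.takeWhile (fun y => y == x) ++ xs.dropWhile (fun y => y == x) = xs :=
      List.takeWhile_append_dropWhile
    by_cases hr : xs.dropWhile (fun y => y == x) = []
    · refine ⟨[], (x, ((xs.takeWhile (fun y => y == x)).length + 1 : Int)), ?_, ?_, by simp⟩
      · rw [ecGroupRuns, hr]
        simp [ecGroupRuns]
      · have hall : ∀ y ∈ x :: xs, y = x := by
          intro y hy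
          rcases List.mem_cons.mp hy with rfl | hy
          · rfl
          · rw [← hsplit, hr, List.append_nil] at hy
            have hy' := List.mem_takeWhile_imp (p := fun y => y == x) hy
            exact eq_of_beq hy'
        exact hall _ (List.getLast_mem hne)
    · have hrp : (xs.dropWhile (fun y => y == x)).Pairwise (· ≤ ·) :=
        List.Pairwise.sublist
          ((List.dropWhile_sublist _).trans (List.sublist_cons_self _ _)) h
      obtain ⟨M', q', h1, h2, h3⟩ := ih hrp hr
      refine ⟨(x, ((xs.takeWhile (fun y => y == x)).length + 1 : Int)) :: M', q', ?_, ?_, ?_⟩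
      · rw [ecGroupRuns, h1]
        rfl
      · have hql : (xs.dropWhile (fun y => y == x)).getLast? = some q'.1 := by
          rw [List.getLast?_eq_some_getLast hr, h2]
        have hgl : (x :: xs).getLast? = some q'.1 := by
          rw [show x :: xs
              = (x :: xs.takeWhile (fun y => y == x)) ++ xs.dropWhile (fun y => y == x) by
            simp [hsplit], List.getLast?_append, hql]
          rfl
        rw [List.getLast?_eq_some_getLast hne] at hgl
        exact Option.some.inj hgl
      · intro p hp
        rcases List.mem_cons.mp hp with rfl | hp
        · have : q'.1 ∈ xs.dropWhile (fun y => y == x) := by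
            rw [← h2]
            exact List.getLast_mem hr
          exact ne_of_lt (hgt _ this)
        · exact h3 p hp

-- the conditional-comma foldl over a list whose last key alone equals `last` is a join
lemma ec_fold_join (fmt : String × Int → String) (last : String) :
    ∀ (M : List (String × Int)) (q : String × Int), q.1 = last → (∀ p ∈ M, p.1 ≠ last) →
    ∀ c : String,
      (M ++ [q]).foldl
        (fun counter kv => if kv.1 == last then counter ++ fmt kv else counter ++ fmt kv ++ ", ") c
      = c ++ PySem.Str.join ", " ((M ++ [q]).map fmt) := by
  intro M
  induction M with
  | nil =>
    intro q hq _ c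
    have : (q.1 == last) = true := beq_iff_eq.mpr hq
    apply String.toList_inj.mp
    simp [List.foldl_cons, hq, PySem.Str.join, PySem.Chars.join_singleton,
      String.toList_append]
  | cons p M' ih =>
    intro q hq hM c
    have hp : (p.1 == last) = false :=
      beq_eq_false_iff_ne.mpr (hM p List.mem_cons_self)
    have hrest := ih q hq (fun p' hp' => hM p' (List.mem_cons_of_mem _ hp')) (c ++ fmt p ++ ", ")
    rw [List.cons_append, List.foldl_cons, hp]
    simp only [Bool.false_eq_true, if_false] at hrest ⊢
    rw [hrest]
    obtain ⟨b, tl, hbt⟩ : ∃ b tl, (M' ++ [q]).map fmt = b :: tl := by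
      cases hmap : (M' ++ [q]).map fmt with
      | nil => simp at hmap
      | cons b tl => exact ⟨b, tl, rfl⟩
    apply String.toList_inj.mp
    rw [show ((p :: (M' ++ [q])).map fmt) = fmt p :: (M' ++ [q]).map fmt from rfl, hbt]
    simp [PySem.Str.join, PySem.Chars.join_cons_cons, String.toList_append, String.toList_ofList]

-- the two bodies agree on any (≤)-sorted list
lemma ec_main (s : List String) (hp : s.Pairwise (· ≤ ·)) :
    ((s.foldl (fun d x => d.insert x ((PySem.List.count s x : Int))) PySem.Dict.empty).items.foldl
      (fun counter kv =>
        if kv.1 == PySem.List.pyGetD s (-1) "" then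
          counter ++ (kv.1 ++ ":" ++ PySem.Int.toStr kv.2)
        else
          counter ++ (kv.1 ++ ":" ++ PySem.Int.toStr kv.2) ++ ", ")
      "")
    = PySem.Str.join ", " ((ecGroupRuns s).map (fun kc => kc.1 ++ ":" ++ PySem.Int.toStr kc.2)) := by
  have hitems : (s.foldl (fun d x => d.insert x ((PySem.List.count s x : Int)))
      PySem.Dict.empty).items = ecGroupRuns s := by
    rw [ec_foldA_items (fun k => (PySem.List.count s k : Int)) s.length s le_rfl hp
      PySem.Dict.empty (by rw [PySem.Dict.keys_empty]; exact List.nodup_nil)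
      (fun y _ => PySem.Dict.contains_empty y)]
    rw [show (PySem.Dict.empty : PySem.Dict String Int).items = [] from rfl, List.nil_append]
    conv_rhs => rw [← List.map_id (ecGroupRuns s)]
    apply List.map_congr_left
    intro p hp'
    rw [Prod.ext_iff]
    exact ⟨rfl, (ec_runs_count s hp p hp').symm⟩
  rw [hitems]
  cases s with
  | nil =>
    apply String.toList_inj.mp
    simp [ecGroupRuns, PySem.Str.join, PySem.Chars.join_nil]
  | cons x xs =>
    obtain ⟨M, q, hruns, hlast, hM⟩ := ec_runs_last (x :: xs) hp (List.cons_ne_nil x xs)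
    have hget : PySem.List.pyGetD (x :: xs) (-1) "" = q.1 := by
      rw [PySem.List.pyGetD_neg_one (x :: xs) "" (List.cons_ne_nil x xs)]
      exact hlast
    rw [hruns, hget]
    rw [ec_fold_join (fun kv => kv.1 ++ ":" ++ PySem.Int.toStr kv.2) q.1 M q rfl hM ""]
    exact String.empty_append

-- ===== VERDICT (by name: the statement is the Claim_ definition above) =====
theorem entity_counter_spec : Claim_equal_entity_counter := by
  intro l _
  unfold Spec_entity_counter entity_counter entity_counter_alt
  exact ec_main (PySem.List.sorted l (fun x => x) false)
    (PySem.List.sorted_pairwise l (fun x => x))
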